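-- pv_equiv track=rewrite | github.com/maldavan5916/VacTimeTP | Documentation/DIPLOM/listingCode/CompresCode.py | remove_multiline_comments
-- ===== SOURCE A (Python) =====
-- def remove_multiline_comments(code):
--     in_string = False
--     in_comment = False
--     result = []
--     i = 0
--     while i < len(code):
--         if not in_comment and not in_string and code[i:i+2] == '/*':
--             in_comment = True
--             i += 2
--         elif in_comment and code[i:i+2] == '*/':
--             in_comment = False
--             i += 2
--         elif not in_comment and code[i] == '"':
--             in_string = not in_string
--             result.append(code[i])
--             i += 1
--         elif not in_comment:
--             result.append(code[i])
--             i += 1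
--         else:
--             i += 1
--     return ''.join(result)
-- ===== SOURCE B (Python) =====
-- def remove_multiline_comments(code):
--     # chunk jumper: no per-character state machine; jump between delimiters with str.find
--     out = []
--     i, n = 0, len(code)
--     while i < n:
--         c = code.find('/*', i)
--         q = code.find('"', i)
--         if c != -1 and (q == -1 or c < q):
--             out.append(code[i:c])
--             e = code.find('*/', c + 2)
--             i = n if e == -1 else e + 2
--         elif q != -1:
--             e = code.find('"', q + 1)
--             if e == -1:
--                 out.append(code[i:])
--                 i = n
--             else:
--                 out.append(code[i:e + 1])
--                 i = e + 1
--         else: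
--             out.append(code[i:])
--             i = n
--     return ''.join(out)
-- ===== Notes on version B (the rewrite author's own statement) =====
-- stated objective: faster
-- what changed: Replaced A's per-character state machine (in_string/in_comment flags, one loop iteration per character with a 2-char slice test) by a chunk jumper that uses str.find to jump directly between '/*', '*/' and '"' delimiters, appending whole slices.
import Mathlib
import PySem

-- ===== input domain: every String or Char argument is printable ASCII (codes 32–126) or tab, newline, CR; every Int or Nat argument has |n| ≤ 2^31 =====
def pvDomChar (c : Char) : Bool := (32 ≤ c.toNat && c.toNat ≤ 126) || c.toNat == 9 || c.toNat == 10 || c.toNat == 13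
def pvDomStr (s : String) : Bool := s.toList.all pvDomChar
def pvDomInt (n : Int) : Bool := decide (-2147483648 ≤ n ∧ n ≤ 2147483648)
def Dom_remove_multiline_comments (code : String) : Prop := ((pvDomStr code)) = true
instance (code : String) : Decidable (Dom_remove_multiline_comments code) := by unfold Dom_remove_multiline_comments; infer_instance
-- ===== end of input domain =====

-- B replaces A's per-character state-machine loop with a delimiter-to-delimiter
-- chunk jumper built on str.find; same return value on every input (total).

-- ===== PORT A =====
-- A's while loop over index i with flags (in_string, in_comment): the remaining
-- characters code[i:] are carried as the list argument, the test
-- code[i:i+2] == '/*' becomes a head? test on the tail, and each branch emits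
-- and advances exactly as A does (i += 2 drops the head and the tail's head).
def pvRunA (inS inC : Bool) : List Char → List Char
  | [] => []
  | c :: rest =>
    if ¬inC ∧ ¬inS ∧ c = '/' ∧ rest.head? = some '*' then
      pvRunA inS true rest.tail
    else if inC ∧ c = '*' ∧ rest.head? = some '/' then
      pvRunA inS false rest.tail
    else if ¬inC ∧ c = '"' then
      c :: pvRunA (!inS) inC rest
    else if ¬inC then
      c :: pvRunA inS inC rest
    else
      pvRunA inS inC rest
  termination_by l => l.length
  decreasing_by all_goals (cases rest <;> simp [List.tail])

def remove_multiline_comments (code : String) : String :=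
  String.mk (pvRunA false false code.toList)

-- ===== PORT B =====
-- B's code.find('xy', i) on the remaining characters code[i:]: returns
-- (prefix before the first match, suffix after it), none if absent
-- (the prefix length is B's found index relative to i).
def pvFind2 (a b : Char) : List Char → Option (List Char × List Char)
  | [] => none
  | c :: rest =>
    if c = a ∧ rest.head? = some b then some ([], rest.tail)
    else (pvFind2 a b rest).map (fun ps => (c :: ps.1, ps.2))

def pvFind1 (a : Char) : List Char → Option (List Char × List Char)
  | [] => none
  | c :: rest =>
    if c = a then some ([], rest)
    else (pvFind1 a rest).map (fun ps => (c :: ps.1, ps.2))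

theorem pvFind2_len {a b : Char} {l p s : List Char}
    (h : pvFind2 a b l = some (p, s)) : p.length + 2 + s.length = l.length := by
  induction l generalizing p s with
  | nil => simp [pvFind2] at h
  | cons c rest ih =>
    simp only [pvFind2] at h
    split at h
    · rename_i hc
      cases rest with
      | nil => simp at hc
      | cons d r => cases h; simp [List.tail]; omega
    · cases hp : pvFind2 a b rest with
      | none => simp [hp] at h
      | some ps =>
        obtain ⟨ps1, ps2⟩ := ps
        simp [hp] at h
        obtain ⟨h1, h2⟩ := h
        subst h1; subst h2
        have := ih hp
        simp; omega

theorem pvFind1_len {a : Char} {l p s : List Char}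
    (h : pvFind1 a l = some (p, s)) : p.length + 1 + s.length = l.length := by
  induction l generalizing p s with
  | nil => simp [pvFind1] at h
  | cons c rest ih =>
    simp only [pvFind1] at h
    split at h
    · cases h; simp; omega
    · cases hp : pvFind1 a rest with
      | none => simp [hp] at h
      | some ps =>
        obtain ⟨ps1, ps2⟩ := ps
        simp [hp] at h
        obtain ⟨h1, h2⟩ := h
        subst h1; subst h2
        have := ih hp
        simp; omega

-- B's outer while loop: compare the positions of the next '/*' and the next '"'
-- (here: the lengths of the prefixes found), drop through the matching '*/' or
-- keep through the closing '"', recurse on the remainder; length lemmas above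
-- justify termination.
def pvRunB (l : List Char) : List Char :=
  match h2 : pvFind2 '/' '*' l, h1 : pvFind1 '"' l with
  | some (p, s), none =>
    p ++ (match he : pvFind2 '*' '/' s with
          | none => []
          | some (_, s') => pvRunB s')
  | some (p, s), some (pq, sq) =>
    if p.length < pq.length then
      p ++ (match he : pvFind2 '*' '/' s with
            | none => []
            | some (_, s') => pvRunB s')
    else
      pq ++ '"' :: (match hc : pvFind1 '"' sq with
            | none => sq
            | some (p2, s2) => p2 ++ '"' :: pvRunB s2)
  | none, some (pq, sq) =>
    pq ++ '"' :: (match hc : pvFind1 '"' sq with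
          | none => sq
          | some (p2, s2) => p2 ++ '"' :: pvRunB s2)
  | none, none => l
  termination_by l.length
  decreasing_by
  · have hA := pvFind2_len h2; have hB := pvFind2_len he; omega
  · have hA := pvFind2_len h2; have hB := pvFind2_len he; omega
  · have hA := pvFind1_len h1; have hB := pvFind1_len hc; omega
  · have hA := pvFind1_len h1; have hB := pvFind1_len hc; omega
def remove_multiline_comments_alt (code : String) : String :=
  String.mk (pvRunB code.toList)

-- ===== PRECONDITION & SPEC =====
def Spec_remove_multiline_comments (code : String) (out : String) : Prop := out = remove_multiline_comments_alt code
instance (code : String) (out : String) : Decidable (Spec_remove_multiline_comments code out) := by unfold Spec_remove_multiline_comments; infer_instance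

-- ===== CLAIM (what is proved, stated in full; the proofs are below) =====
def Claim_equal_remove_multiline_comments : Prop := ∀ (code : String), Dom_remove_multiline_comments code → Spec_remove_multiline_comments code (remove_multiline_comments code)

-- ===== LEMMAS AND PROOFS =====

-- In comment mode A emits nothing and scans for '*/' (in_string is false there,
-- since a comment is only entered from normal mode).
theorem pvRunA_comment (l : List Char) :
    pvRunA false true l =
      (match pvFind2 '*' '/' l with
       | none => []
       | some (_, s) => pvRunA false false s) := by
  induction l with
  | nil => simp [pvRunA, pvFind2]
  | cons c rest ih =>
    by_cases hc : c = '*' ∧ rest.head? = some '/'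
    · rw [pvRunA, pvFind2]; simp [hc]
    · rw [pvRunA, pvFind2]
      rw [if_neg (by simp), if_neg (by simpa using hc), if_neg (by simp), if_neg (by simp)]
      rw [ih]
      cases hp : pvFind2 '*' '/' rest <;> simp [hp, hc]

theorem pvRunA_string (l : List Char) :
    pvRunA true false l =
      (match pvFind1 '"' l with
       | none => l
       | some (p, s) => p ++ '"' :: pvRunA false false s) := by
  induction l with
  | nil => simp [pvRunA, pvFind1]
  | cons c rest ih =>
    by_cases hc : c = '"'
    · subst hc; rw [pvRunA, pvFind1]; simp
    · rw [pvRunA, pvFind1]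
      simp only [Bool.not_true, Bool.false_eq_true, false_and, and_false, if_false,
        Bool.not_false, true_and, if_neg hc, if_pos trivial]
      rw [ih]
      cases hp : pvFind1 '"' rest <;> simp [hp, hc]

-- non-dependent unfolding of pvRunB
theorem pvRunB_eq (l : List Char) :
    pvRunB l =
      (match pvFind2 '/' '*' l, pvFind1 '"' l with
       | some (p, s), none =>
         p ++ (match pvFind2 '*' '/' s with
               | none => []
               | some (_, s') => pvRunB s')
       | some (p, s), some (pq, sq) =>
         if p.length < pq.length then
           p ++ (match pvFind2 '*' '/' s with
                 | none => []
                 | some (_, s') => pvRunB s')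
         else
           pq ++ '"' :: (match pvFind1 '"' sq with
                 | none => sq
                 | some (p2, s2) => p2 ++ '"' :: pvRunB s2)
       | none, some (pq, sq) =>
         pq ++ '"' :: (match pvFind1 '"' sq with
               | none => sq
               | some (p2, s2) => p2 ++ '"' :: pvRunB s2)
       | none, none => l) := by
  rw [pvRunB]
  split <;> rename_i heq2 heq1 <;> simp [heq2, heq1] <;> split <;> split <;>
    simp_all <;> (try split) <;> simp_all

theorem pvFind2_cons_neg {a b c : Char} {rest : List Char} (h : ¬(c = a ∧ rest.head? = some b)) :
    pvFind2 a b (c :: rest) = (pvFind2 a b rest).map (fun ps => (c :: ps.1, ps.2)) := by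
  rw [pvFind2, if_neg h]

theorem pvFind1_cons_neg {a c : Char} {rest : List Char} (h : ¬c = a) :
    pvFind1 a (c :: rest) = (pvFind1 a rest).map (fun ps => (c :: ps.1, ps.2)) := by
  rw [pvFind1, if_neg h]

theorem pvRunB_cons (c : Char) (rest : List Char)
    (h1 : ¬(c = '/' ∧ rest.head? = some '*')) (h2 : ¬c = '"') :
    pvRunB (c :: rest) = c :: pvRunB rest := by
  rw [pvRunB_eq]
  conv_rhs => rw [pvRunB_eq]
  rw [pvFind2_cons_neg h1, pvFind1_cons_neg h2]
  cases hf2 : pvFind2 '/' '*' rest <;> cases hf1 : pvFind1 '"' rest <;> simp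
  all_goals first
  | (split <;> rfl)
  | (rename_i p1 p2
     obtain ⟨a1, b1⟩ := p1
     obtain ⟨a2, b2⟩ := p2
     by_cases hlt : a1.length < a2.length <;> simp [hlt] <;> split <;> rfl)

theorem pvRunA_eq_pvRunB : ∀ (n : Nat) (l : List Char), l.length ≤ n →
    pvRunA false false l = pvRunB l := by
  intro n
  induction n with
  | zero =>
    intro l hl
    have he : l = [] := by cases l <;> simp_all
    subst he
    rw [pvRunA, pvRunB_eq]
    simp [pvFind2, pvFind1]
  | succ n ih =>
    intro l hl
    cases l with
    | nil => rw [pvRunA, pvRunB_eq]; simp [pvFind2, pvFind1]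
    | cons c rest =>
      simp only [List.length_cons] at hl
      by_cases hcom : c = '/' ∧ rest.head? = some '*'
      · -- comment opener: A enters comment mode, B's pvFind2 hits at index 0
        rw [pvRunA, if_pos (by simpa using hcom), pvRunA_comment, pvRunB_eq]
        have hf2 : pvFind2 '/' '*' (c :: rest) = some ([], rest.tail) := by
          rw [pvFind2, if_pos hcom]
        rw [hf2]
        have hq : ¬c = '"' := by intro h; rw [h] at hcom; exact absurd hcom.1 (by decide)
        rw [pvFind1_cons_neg hq]
        cases hf1 : pvFind1 '"' rest <;> simp
        all_goals {
          cases he : pvFind2 '*' '/' rest.tail <;> simp [he]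
          · rename_i p
            obtain ⟨pp, ss⟩ := p
            have hlen := pvFind2_len he
            have htl : rest.tail.length ≤ rest.length := by cases rest <;> simp [List.tail]
            exact ih ss (by omega)
        }
      · by_cases hq : c = '"'
        · -- string opener
          subst hq
          rw [pvRunA, if_neg (by simp), if_neg (by simp), if_pos (by simp)]
          simp only [Bool.not_false]
          rw [pvRunA_string, pvRunB_eq]
          have hf1 : pvFind1 '"' ('"' :: rest) = some ([], rest) := by
            rw [pvFind1, if_pos rfl]
          rw [hf1, pvFind2_cons_neg (by simpa using hcom)]
          cases hf2 : pvFind2 '/' '*' rest <;> simp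
          all_goals {
            cases he : pvFind1 '"' rest <;> simp [he]
            · rename_i p
              obtain ⟨pp, ss⟩ := p
              have hlen := pvFind1_len he
              exact ih ss (by omega)
          }
        · -- ordinary character
          rw [pvRunA, if_neg (by simpa using hcom), if_neg (by simp), if_neg (by simp [hq]),
            if_pos (by simp)]
          rw [pvRunB_cons c rest hcom hq, ih rest (by omega)]

-- ===== VERDICT (by name: the statement is the Claim_ definition above) =====
theorem remove_multiline_comments_spec : Claim_equal_remove_multiline_comments := by
  intro code _
  unfold Spec_remove_multiline_comments remove_multiline_comments remove_multiline_comments_alt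
  rw [pvRunA_eq_pvRunB code.toList.length code.toList le_rfl]
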